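-- pv_equiv track=rewrite | github.com/jackrosenthal/kajiki | kajiki/lnotab.py | lnotab
-- ===== SOURCE A (Python) =====
-- def lnotab(pairs, first_lineno=0):
--     """Yields byte integers representing the pairs of integers passed in."""
--     assert first_lineno <= pairs[0][1]  # noqa: S101
--     cur_byte, cur_line = 0, first_lineno
--     for byte_off, line_off in pairs:
--         byte_delta = byte_off - cur_byte
--         line_delta = line_off - cur_line
--         assert byte_delta >= 0  # noqa: S101
--         while byte_delta > 255:  # noqa: PLR2004
--             yield 255  # byte
--             yield 0  # line
--             byte_delta -= 255
--         yield byte_delta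
--         while line_delta >= 0x80:  # noqa: PLR2004
--             yield 0x7F  # line
--             yield 0  # byte
--             line_delta -= 0x7F
--         while line_delta < -0x80:  # noqa: PLR2004
--             yield 0x80  # line
--             yield 0  # byte
--             line_delta += 0x80
--         if line_delta < 0:
--             line_delta += 0x100
--             assert 0x80 <= line_delta <= 0xFF  # noqa: S101, PLR2004
--         yield line_delta
--         cur_byte, cur_line = byte_off, line_off
-- ===== SOURCE B (Python) =====
-- def lnotab(pairs, first_lineno=0):
--     """Yields byte integers representing the pairs of integers passed in."""
--     assert first_lineno <= pairs[0][1]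
--     cur_byte, cur_line = 0, first_lineno
--     for byte_off, line_off in pairs:
--         byte_delta = byte_off - cur_byte
--         line_delta = line_off - cur_line
--         assert byte_delta >= 0
--         # closed-form chunk counts instead of repeated-subtraction loops
--         q = (byte_delta - 1) // 255 if byte_delta else 0
--         yield from (255, 0) * q
--         yield byte_delta - 255 * q
--         if line_delta >= 0x80:
--             k = (line_delta - 0x80) // 0x7F + 1
--             yield from (0x7F, 0) * k
--             yield line_delta - 0x7F * k
--         elif line_delta < -0x80:
--             k = (-0x80 - line_delta + 0x7F) // 0x80
--             yield from (0x80, 0) * k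
--             yield line_delta + 0x80 * k + 0x100
--         else:
--             yield line_delta + 0x100 if line_delta < 0 else line_delta
--         cur_byte, cur_line = byte_off, line_off
-- ===== Notes on version B (the rewrite author's own statement) =====
-- stated objective: simpler
-- what changed: Each inner repeated-subtraction while-loop (255-byte chunks, +127/-128 line chunks) is replaced by a closed-form floor-division chunk count, so no inner loop remains in the per-pair body.
import Mathlib
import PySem

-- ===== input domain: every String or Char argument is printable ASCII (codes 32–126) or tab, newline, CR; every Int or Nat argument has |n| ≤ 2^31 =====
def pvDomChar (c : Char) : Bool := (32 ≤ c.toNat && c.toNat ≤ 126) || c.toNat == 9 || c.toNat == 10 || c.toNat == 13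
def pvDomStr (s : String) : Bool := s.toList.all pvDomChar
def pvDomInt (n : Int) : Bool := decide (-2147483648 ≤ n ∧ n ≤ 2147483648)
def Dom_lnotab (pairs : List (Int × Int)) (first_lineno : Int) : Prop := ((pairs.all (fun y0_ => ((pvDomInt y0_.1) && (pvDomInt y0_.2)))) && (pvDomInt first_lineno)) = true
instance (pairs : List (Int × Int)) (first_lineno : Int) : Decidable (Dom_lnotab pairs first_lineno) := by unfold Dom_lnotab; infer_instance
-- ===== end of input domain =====

-- B replaces each inner chunking while-loop by a closed-form chunk count (floor-division arithmetic);
-- objective: simpler per-pair code, no speed claim. Both Pythons are generators; the ports compare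
-- the full yielded sequence as a list.

-- ===== PORT A =====
-- while byte_delta > 255: yield 255; yield 0; byte_delta -= 255   (yielded list, final byte_delta)
def byteWhile (bd : Int) : List Int × Int :=
  if bd > 255 then
    let r := byteWhile (bd - 255)
    (255 :: 0 :: r.1, r.2)
  else ([], bd)
termination_by bd.toNat
decreasing_by omega

-- while line_delta >= 0x80: yield 0x7F; yield 0; line_delta -= 0x7F
def whilePos (ld : Int) : List Int × Int :=
  if ld ≥ 128 then
    let r := whilePos (ld - 127)
    (127 :: 0 :: r.1, r.2)
  else ([], ld)
termination_by ld.toNat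
decreasing_by omega

-- while line_delta < -0x80: yield 0x80; yield 0; line_delta += 0x80
def whileNeg (ld : Int) : List Int × Int :=
  if ld < -128 then
    let r := whileNeg (ld + 128)
    (128 :: 0 :: r.1, r.2)
  else ([], ld)
termination_by (-ld).toNat
decreasing_by omega

def lnotabGo : List (Int × Int) → Int → Int → List Int
  | [], _, _ => []
  | (byte_off, line_off) :: rest, cur_byte, cur_line =>
    let byte_delta := byte_off - cur_byte
    let line_delta := line_off - cur_line
    let b := byteWhile byte_delta
    let p := whilePos line_delta
    let n := whileNeg p.2
    let fin := if n.2 < 0 then n.2 + 256 else n.2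
    b.1 ++ [b.2] ++ p.1 ++ n.1 ++ [fin] ++ lnotabGo rest byte_off line_off

def lnotab (pairs : List (Int × Int)) (first_lineno : Int) : List Int :=
  lnotabGo pairs 0 first_lineno

-- ===== PORT B =====
-- (c, 0) * n
def rep2 : Nat → Int → List Int
  | 0, _ => []
  | n + 1, c => c :: 0 :: rep2 n c

def lnotabAltGo : List (Int × Int) → Int → Int → List Int
  | [], _, _ => []
  | (byte_off, line_off) :: rest, cur_byte, cur_line =>
    let byte_delta := byte_off - cur_byte
    let line_delta := line_off - cur_line
    let q := if byte_delta ≠ 0 then PySem.Int.floordiv (byte_delta - 1) 255 else 0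
    let lineBytes :=
      if line_delta ≥ 128 then
        let k := PySem.Int.floordiv (line_delta - 128) 127 + 1
        rep2 k.toNat 127 ++ [line_delta - 127 * k]
      else if line_delta < -128 then
        let k := PySem.Int.floordiv (-128 - line_delta + 127) 128
        rep2 k.toNat 128 ++ [line_delta + 128 * k + 256]
      else [if line_delta < 0 then line_delta + 256 else line_delta]
    rep2 q.toNat 255 ++ [byte_delta - 255 * q] ++ lineBytes ++ lnotabAltGo rest byte_off line_off

def lnotab_alt (pairs : List (Int × Int)) (first_lineno : Int) : List Int :=
  lnotabAltGo pairs 0 first_lineno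

-- ===== PRECONDITION & SPEC =====
-- Pre_ excludes exactly the inputs where Python A raises once consumed: empty pairs (IndexError on
-- pairs[0][1]), first_lineno > pairs[0][1] (assert), or a byte offset below its predecessor / below 0
-- (assert byte_delta >= 0); the chain from (0, first_lineno) says the byte offsets are nondecreasing from 0.
def Pre_lnotab (pairs : List (Int × Int)) (first_lineno : Int) : Prop :=
  pairs ≠ [] ∧ first_lineno ≤ (pairs.headI).2 ∧
    List.IsChain (fun p q : Int × Int => p.1 ≤ q.1) ((0, first_lineno) :: pairs)
instance (pairs : List (Int × Int)) (first_lineno : Int) : Decidable (Pre_lnotab pairs first_lineno) := by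
  unfold Pre_lnotab; infer_instance

def pvWitness_lnotab : (List (Int × Int)) × Int := ([(6, 1), (300, 500), (300, 2)], 1)

def Spec_lnotab (pairs : List (Int × Int)) (first_lineno : Int) (out : List Int) : Prop := out = lnotab_alt pairs first_lineno
instance (pairs : List (Int × Int)) (first_lineno : Int) (out : List Int) : Decidable (Spec_lnotab pairs first_lineno out) := by unfold Spec_lnotab; infer_instance

-- ===== CLAIM (what is proved, stated in full; the proofs are below) =====
def Claim_equal_lnotab : Prop := ∀ (pairs : List (Int × Int)) (first_lineno : Int), Dom_lnotab pairs first_lineno → Pre_lnotab pairs first_lineno → Spec_lnotab pairs first_lineno (lnotab pairs first_lineno)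

-- ===== LEMMAS AND PROOFS =====

lemma fd_pos (a b : Int) (hb : 0 < b) : PySem.Int.floordiv a b = a / b :=
  PySem.Int.floordiv_eq_ediv_of_pos hb

lemma rep2_succ_of_pos (q : Int) (c : Int) (hq : 1 ≤ q) :
    rep2 q.toNat c = c :: 0 :: rep2 (q - 1).toNat c := by
  have h : q.toNat = (q - 1).toNat + 1 := by omega
  rw [h, rep2]

-- byte part: A's while-loop output equals B's closed form, for byte_delta ≥ 0
lemma byte_eq (bd : Int) (h : 0 ≤ bd) :
    (byteWhile bd).1 ++ [(byteWhile bd).2] =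
      rep2 (if bd ≠ 0 then PySem.Int.floordiv (bd - 1) 255 else 0).toNat 255 ++
        [bd - 255 * (if bd ≠ 0 then PySem.Int.floordiv (bd - 1) 255 else 0)] := by
  by_cases hgt : bd > 255
  · have hne : bd ≠ 0 := by omega
    have hne' : bd - 255 ≠ 0 := by omega
    have ih := byte_eq (bd - 255) (by omega)
    rw [byteWhile]
    rw [if_pos hgt, if_pos hne, if_pos hne'] at *
    rw [fd_pos _ _ (by norm_num)] at ih ⊢
    have hq1 : 1 ≤ (bd - 1) / 255 := by omega
    rw [rep2_succ_of_pos _ _ hq1]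
    have hstep : (bd - 1) / 255 - 1 = (bd - 255 - 1) / 255 := by omega
    have hres : bd - 255 * ((bd - 1) / 255) = bd - 255 - 255 * ((bd - 255 - 1) / 255) := by omega
    rw [hstep, hres]
    simpa using ih
  · rw [byteWhile, if_neg hgt]
    by_cases h0 : bd = 0
    · subst h0; simp [rep2]
    · rw [if_pos h0]
      have hq0 : PySem.Int.floordiv (bd - 1) 255 = 0 := by
        rw [fd_pos _ _ (by norm_num)]; omega
      rw [hq0]
      simp [rep2]
termination_by bd.toNat
decreasing_by omega

lemma whilePos_stop (ld : Int) (h : ld < 128) : whilePos ld = ([], ld) := by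
  rw [whilePos, if_neg (by omega)]

lemma whileNeg_stop (ld : Int) (h : -128 ≤ ld) : whileNeg ld = ([], ld) := by
  rw [whileNeg, if_neg (by omega)]

lemma whilePos_closed (ld : Int) (h : 128 ≤ ld) :
    whilePos ld = (rep2 (PySem.Int.floordiv (ld - 128) 127 + 1).toNat 127,
                   ld - 127 * (PySem.Int.floordiv (ld - 128) 127 + 1)) := by
  rw [whilePos, if_pos (by omega : ld ≥ 128)]
  rw [fd_pos _ _ (by norm_num)]
  by_cases h2 : 128 ≤ ld - 127
  · have ih := whilePos_closed (ld - 127) h2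
    rw [fd_pos _ _ (by norm_num)] at ih
    rw [ih]
    have hq1 : 1 ≤ (ld - 128) / 127 + 1 := by omega
    rw [rep2_succ_of_pos _ _ hq1]
    have hstep : (ld - 128) / 127 + 1 - 1 = (ld - 127 - 128) / 127 + 1 := by omega
    have hres : ld - 127 * ((ld - 128) / 127 + 1) =
        ld - 127 - 127 * ((ld - 127 - 128) / 127 + 1) := by omega
    rw [hstep, hres]
  · rw [whilePos_stop (ld - 127) (by omega)]
    have hk : (ld - 128) / 127 = 0 := by omega
    rw [hk]
    norm_num [rep2]
termination_by ld.toNat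
decreasing_by omega

lemma whileNeg_closed (ld : Int) (h : ld < -128) :
    whileNeg ld = (rep2 (PySem.Int.floordiv (-128 - ld + 127) 128).toNat 128,
                   ld + 128 * PySem.Int.floordiv (-128 - ld + 127) 128) := by
  rw [whileNeg, if_pos h]
  rw [fd_pos _ _ (by norm_num)]
  by_cases h2 : ld + 128 < -128
  · have ih := whileNeg_closed (ld + 128) h2
    rw [fd_pos _ _ (by norm_num)] at ih
    rw [ih]
    have hq1 : 1 ≤ (-128 - ld + 127) / 128 := by omega
    rw [rep2_succ_of_pos _ _ hq1]
    have hstep : (-128 - ld + 127) / 128 - 1 = (-128 - (ld + 128) + 127) / 128 := by omega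
    have hres : ld + 128 * ((-128 - ld + 127) / 128) =
        ld + 128 + 128 * ((-128 - (ld + 128) + 127) / 128) := by omega
    rw [hstep, hres]
  · rw [whileNeg_stop (ld + 128) (by omega)]
    have hk : (-128 - ld + 127) / 128 = 1 := by omega
    rw [hk]
    norm_num [rep2]
termination_by (-ld).toNat
decreasing_by omega

-- line part: A's three sequential steps equal B's closed-form branches, for every line_delta
lemma line_eq (ld : Int) :
    (whilePos ld).1 ++ (whileNeg (whilePos ld).2).1 ++
      [(if (whileNeg (whilePos ld).2).2 < 0 then (whileNeg (whilePos ld).2).2 + 256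
        else (whileNeg (whilePos ld).2).2)] =
    (if ld ≥ 128 then
        rep2 (PySem.Int.floordiv (ld - 128) 127 + 1).toNat 127 ++
          [ld - 127 * (PySem.Int.floordiv (ld - 128) 127 + 1)]
      else if ld < -128 then
        rep2 (PySem.Int.floordiv (-128 - ld + 127) 128).toNat 128 ++
          [ld + 128 * PySem.Int.floordiv (-128 - ld + 127) 128 + 256]
      else [if ld < 0 then ld + 256 else ld]) := by
  by_cases hp : 128 ≤ ld
  · rw [whilePos_closed ld hp, if_pos (by omega : ld ≥ 128)]
    have hfd : PySem.Int.floordiv (ld - 128) 127 = (ld - 128) / 127 := fd_pos _ _ (by norm_num)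
    have hres : 0 ≤ ld - 127 * (PySem.Int.floordiv (ld - 128) 127 + 1) ∧
        ld - 127 * (PySem.Int.floordiv (ld - 128) 127 + 1) < 128 := by
      rw [hfd]; omega
    rw [whileNeg_stop _ (by omega)]
    simp only [if_neg (by omega : ¬ (ld - 127 * (PySem.Int.floordiv (ld - 128) 127 + 1) < 0))]
    simp
  · rw [whilePos_stop ld (by omega), if_neg (by omega : ¬ ld ≥ 128)]
    by_cases hn : ld < -128
    · rw [whileNeg_closed ld hn, if_pos hn]
      have hfd : PySem.Int.floordiv (-128 - ld + 127) 128 = (-128 - ld + 127) / 128 :=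
        fd_pos _ _ (by norm_num)
      have hres : ld + 128 * PySem.Int.floordiv (-128 - ld + 127) 128 < 0 ∧
          -128 ≤ ld + 128 * PySem.Int.floordiv (-128 - ld + 127) 128 := by
        rw [hfd]; omega
      rw [if_pos hres.1]
      simp
    · rw [whileNeg_stop ld (by omega), if_neg hn]
      simp

lemma go_eq (pairs : List (Int × Int)) (cb cl : Int)
    (hch : List.IsChain (fun p q : Int × Int => p.1 ≤ q.1) ((cb, cl) :: pairs)) :
    lnotabGo pairs cb cl = lnotabAltGo pairs cb cl := by
  induction pairs generalizing cb cl with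
  | nil => rfl
  | cons hd tl ih =>
    obtain ⟨bo, lo⟩ := hd
    rw [List.isChain_cons_cons] at hch
    have hbd : (0 : Int) ≤ bo - cb := by have := hch.1; simp at this; omega
    rw [lnotabGo, lnotabAltGo]
    simp only []
    rw [ih bo lo hch.2]
    have hb := byte_eq (bo - cb) hbd
    have hl := line_eq (lo - cl)
    rw [← hb, ← hl]
    simp

theorem lnotab_spec : Claim_equal_lnotab := by
  intro pairs first_lineno _hdom hpre
  unfold Spec_lnotab lnotab lnotab_alt
  exact go_eq pairs 0 first_lineno hpre.2.2
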